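-- pv_equiv track=rewrite | github.com/Alexander7170/Actividades_Programacion_UTN | Actividades_Programacion_UTN/pygame/logica.py | obtener_ubicacion_tablero_imagenes
-- ===== SOURCE A (Python) =====
-- def obtener_ubicacion_tablero_imagenes(tablero:list)->list:
--     """
--     Funcion que obtiene las ubicacion de las imagenes del tablero
--     donde cada imagen tendra su respectiva ubicacion
--
--     Devuelve una lista anidada, donde cada sublista representa la coordenada donde se ubicara la imagen
--     """
--     ubicaciones_ordenada = []
--     sentido_derecho = True
--     sentido_izquierdo = False
--     eje_x = 120
--     eje_y = 400
--     for i in range(len(tablero)):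
--         if i % 6 == 0:
--             if i != 0:
--                 eje_y -= 78
--                 if sentido_derecho:
--                     sentido_izquierdo = True
--                     sentido_derecho = False
--                 elif sentido_izquierdo:
--                     sentido_derecho = True
--                     sentido_izquierdo = False
--         elif sentido_derecho:
--             eje_x += 115
--         elif sentido_izquierdo:
--             eje_x -= 115
--         ubicaciones_ordenada.append((eje_x,eje_y))
--
--     return ubicaciones_ordenada
-- ===== SOURCE B (Python) =====
-- def obtener_ubicacion_tablero_imagenes(tablero: list) -> list:
--     return [
--         ((120 + 115 * (i % 6)) if (i // 6) % 2 == 0 else (120 + 115 * (5 - i % 6)),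
--          400 - 78 * (i // 6))
--         for i in range(len(tablero))
--     ]
-- ===== Notes on version B (the rewrite author's own statement) =====
-- stated objective: simpler
-- what changed: Replaces the stateful loop with mutable eje_x/eje_y and direction flags by a single list comprehension computing each coordinate in closed form from row = i//6 and col = i%6.
import Mathlib
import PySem

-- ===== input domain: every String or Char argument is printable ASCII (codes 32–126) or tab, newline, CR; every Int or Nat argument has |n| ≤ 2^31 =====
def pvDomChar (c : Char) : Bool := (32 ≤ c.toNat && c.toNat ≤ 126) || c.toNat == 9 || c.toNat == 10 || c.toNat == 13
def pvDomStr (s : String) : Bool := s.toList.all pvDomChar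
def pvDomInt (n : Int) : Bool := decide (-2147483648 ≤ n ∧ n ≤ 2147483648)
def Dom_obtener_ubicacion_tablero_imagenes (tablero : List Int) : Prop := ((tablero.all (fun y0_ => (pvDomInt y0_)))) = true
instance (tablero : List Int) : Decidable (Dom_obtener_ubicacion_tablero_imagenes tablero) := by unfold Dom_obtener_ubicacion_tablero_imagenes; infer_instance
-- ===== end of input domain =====

-- B replaces A's stateful loop (direction flags, running eje_x/eje_y) by a closed-form
-- per-index formula in a list comprehension; objective: simpler.

-- ===== PORT A =====
-- loop body of A: state = (accumulated list, sentido_derecho, sentido_izquierdo, eje_x, eje_y)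
def pvStepA (st : List (Int × Int) × Bool × Bool × Int × Int) (i : Nat) :
    List (Int × Int) × Bool × Bool × Int × Int :=
  let (acc, der, izq, x, y) := st
  if i % 6 == 0 then
    if i != 0 then
      let y := y - 78
      if der then (acc ++ [(x, y)], false, true, x, y)
      else if izq then (acc ++ [(x, y)], true, false, x, y)
      else (acc ++ [(x, y)], der, izq, x, y)
    else (acc ++ [(x, y)], der, izq, x, y)
  else if der then (acc ++ [(x + 115, y)], der, izq, x + 115, y)
  else if izq then (acc ++ [(x - 115, y)], der, izq, x - 115, y)
  else (acc ++ [(x, y)], der, izq, x, y)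

def obtener_ubicacion_tablero_imagenes (tablero : List Int) : List (Int × Int) :=
  ((List.range tablero.length).foldl pvStepA ([], true, false, 120, 400)).1

-- ===== PORT B =====
def obtener_ubicacion_tablero_imagenes_alt (tablero : List Int) : List (Int × Int) :=
  (List.range tablero.length).map (fun (i : Nat) =>
    ((if (i / 6) % 2 = 0 then 120 + 115 * (i % 6 : Int) else 120 + 115 * (5 - (i % 6 : Int))),
      400 - 78 * (i / 6 : Int)))

-- ===== PRECONDITION & SPEC =====
def Spec_obtener_ubicacion_tablero_imagenes (tablero : List Int) (out : List (Int × Int)) : Prop := out = obtener_ubicacion_tablero_imagenes_alt tablero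
instance (tablero : List Int) (out : List (Int × Int)) : Decidable (Spec_obtener_ubicacion_tablero_imagenes tablero out) := by unfold Spec_obtener_ubicacion_tablero_imagenes; infer_instance

-- ===== CLAIM (what is proved, stated in full; the proofs are below) =====
def Claim_equal_obtener_ubicacion_tablero_imagenes : Prop := ∀ (tablero : List Int), Dom_obtener_ubicacion_tablero_imagenes tablero → Spec_obtener_ubicacion_tablero_imagenes tablero (obtener_ubicacion_tablero_imagenes tablero)

-- ===== LEMMAS AND PROOFS =====
def pvSnake (i : Nat) : Int × Int :=
  ((if (i / 6) % 2 = 0 then 120 + 115 * (i % 6 : Int) else 120 + 115 * (5 - (i % 6 : Int))),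
    400 - 78 * (i / 6 : Int))

lemma pvAlt_eq_map (tablero : List Int) :
    obtener_ubicacion_tablero_imagenes_alt tablero = (List.range tablero.length).map pvSnake := rfl

lemma pvFoldA (n : Nat) :
    (List.range (n + 1)).foldl pvStepA ([], true, false, 120, 400) =
      ((List.range (n + 1)).map pvSnake,
        decide ((n / 6) % 2 = 0), !decide ((n / 6) % 2 = 0),
        (pvSnake n).1, (pvSnake n).2) := by
  induction n with
  | zero => decide
  | succ m ih =>
    rw [List.range_succ, List.foldl_append, ih]
    simp only [List.foldl_cons, List.foldl_nil, pvStepA]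
    by_cases h6 : (m + 1) % 6 = 0
    · have hrow : (m + 1) / 6 = m / 6 + 1 := by omega
      have hm6 : m % 6 = 5 := by omega
      by_cases hp : (m / 6) % 2 = 0
      · have hp' : ((m + 1) / 6) % 2 ≠ 0 := by omega
        simp [h6, hp, hp', pvSnake, hrow, hm6, List.map_append] <;> omega
      · have hp' : ((m + 1) / 6) % 2 = 0 := by omega
        simp [h6, hp, hp', pvSnake, hrow, hm6, List.map_append] <;> omega
    · have hrow : (m + 1) / 6 = m / 6 := by omega
      have hm6 : (m + 1) % 6 = m % 6 + 1 := by omega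
      by_cases hp : (m / 6) % 2 = 0
      · simp [h6, hp, pvSnake, hrow, hm6, List.map_append] <;> omega
      · simp [h6, hp, pvSnake, hrow, hm6, List.map_append] <;> omega

-- ===== VERDICT (by name: the statement is the Claim_ definition above) =====
theorem obtener_ubicacion_tablero_imagenes_spec : Claim_equal_obtener_ubicacion_tablero_imagenes := by
  intro tablero _
  unfold Spec_obtener_ubicacion_tablero_imagenes
  rw [pvAlt_eq_map]
  unfold obtener_ubicacion_tablero_imagenes
  cases h : tablero.length with
  | zero => simp
  | succ n => rw [pvFoldA]
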